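-- pv_equiv track=rewrite | github.com/SvobodinF/kurdyukovAA | Lesson_4/ex-7.py | func
-- ===== SOURCE A (Python) =====
-- def func(n):
--     a = 1
--     s = 0
--
--     while a <= n:
--         x = 1
--         for i in range(1,n,1):
--             x *= i
--
--
--         s += x
--         a += 1
--
--     return s
-- ===== SOURCE B (Python) =====
-- def func(n):
--     if n < 1:
--         return 0
--     f = 1
--     for i in range(1, n):
--         f *= i
--     return n * f
-- ===== Notes on version B (the rewrite author's own statement) =====
-- stated objective: faster
-- what changed: B computes (n-1)! once and multiplies by n, instead of A's outer while loop that recomputes the same factorial product n times.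
import Mathlib
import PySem

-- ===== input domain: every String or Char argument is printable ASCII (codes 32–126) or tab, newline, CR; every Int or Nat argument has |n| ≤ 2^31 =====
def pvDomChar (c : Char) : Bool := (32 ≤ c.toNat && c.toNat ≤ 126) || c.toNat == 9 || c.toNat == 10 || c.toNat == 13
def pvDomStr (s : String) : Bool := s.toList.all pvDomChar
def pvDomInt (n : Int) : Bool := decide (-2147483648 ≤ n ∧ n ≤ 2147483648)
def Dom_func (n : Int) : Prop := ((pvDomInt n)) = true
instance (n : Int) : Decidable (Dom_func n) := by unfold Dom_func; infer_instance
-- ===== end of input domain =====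

-- B replaces A's n-fold recomputation of the same factorial by one factorial and a multiply (asymptotically faster).
-- ===== PORT A =====
-- inner for-loop: x = 1; for i in range(1, n, 1): x *= i
def funcInner (n : Int) : Int := (PySem.List.pyRange 1 n 1).foldl (· * ·) 1

-- outer while-loop over a, recomputing the inner product each iteration, as in A
def funcLoop (n a s : Int) : Int :=
  if a ≤ n then funcLoop n (a + 1) (s + funcInner n) else s
termination_by (n + 1 - a).toNat
decreasing_by omega

def func (n : Int) : Int := funcLoop n 1 0

-- ===== PORT B =====
def func_alt (n : Int) : Int :=
  if n < 1 then 0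
  else n * (PySem.List.pyRange 1 n 1).foldl (· * ·) 1

-- ===== PRECONDITION & SPEC =====
def Spec_func (n : Int) (out : Int) : Prop := out = func_alt n
instance (n : Int) (out : Int) : Decidable (Spec_func n out) := by unfold Spec_func; infer_instance

-- ===== CLAIM (what is proved, stated in full; the proofs are below) =====
def Claim_equal_func : Prop := ∀ (n : Int), Dom_func n → Spec_func n (func n)

-- ===== LEMMAS AND PROOFS =====
lemma funcLoop_eq (n : Int) (k : Nat) : ∀ (a s : Int), (n + 1 - a).toNat = k →
    funcLoop n a s = s + (k : Int) * funcInner n := by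
  induction k with
  | zero =>
    intro a s h
    rw [funcLoop]
    have : ¬ a ≤ n := by omega
    simp [this]
  | succ k ih =>
    intro a s h
    rw [funcLoop]
    have ha : a ≤ n := by omega
    rw [if_pos ha, ih (a + 1) _ (by omega)]
    push_cast
    ring

-- ===== VERDICT (by name: the statement is the Claim_ definition above) =====
theorem func_spec : Claim_equal_func := by
  intro n _
  show funcLoop n 1 0 = func_alt n
  rw [funcLoop_eq n (n + 1 - 1).toNat 1 0 rfl]
  unfold func_alt funcInner
  by_cases h : n < 1
  · have h0 : ((n + 1 - 1).toNat : Int) = 0 := by omega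
    rw [h0, if_pos h]; ring
  · have : ((n + 1 - 1).toNat : Int) = n := by omega
    rw [if_neg h, this]
    ring
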